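-- pv_equiv track=rewrite | github.com/stegua/AVC2023 | python/day18/solution_v0_part1.py | MakeListPs
-- ===== SOURCE A (Python) =====
-- def MakeListPs(Ls):
--     x, y = 0, 0
--     Ps = [(x, y)]
--     for l in Ls:
--         move, delta = l
--         if move == 'U':
--             x = x + delta
--         if move == 'R':
--             y = y + delta
--         if move == 'D':
--             x = x - delta
--         if move == 'L':
--             y = y - delta
--         Ps.append( (x, y) )
--     # From here (simple polygon area):
--     # https://en.wikipedia.org/wiki/Polygon#Area
--     inside = sum((x1*y2 - x2*y1) for (x1, y1), (x2, y2) in zip(Ps[:-1], Ps[1:]))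
--     border = sum(l[1] for l in Ls)
--     return int(inside + border)//2 + 1
-- ===== SOURCE B (Python) =====
-- def MakeListPs(Ls):
--     # Single fused pass: running point (x, y), shoelace accumulator and border
--     # length, no intermediate vertex list and no zip pass.
--     x, y = 0, 0
--     inside = 0
--     border = 0
--     for move, delta in Ls:
--         if move == 'U':
--             nx, ny = x + delta, y
--         elif move == 'R':
--             nx, ny = x, y + delta
--         elif move == 'D':
--             nx, ny = x - delta, y
--         elif move == 'L':
--             nx, ny = x, y - delta
--         else:
--             nx, ny = x, y
--         inside += x * ny - nx * y
--         border += delta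
--         x, y = nx, ny
--     return (inside + border) // 2 + 1
-- ===== Notes on version B (the rewrite author's own statement) =====
-- stated objective: simpler
-- what changed: B fuses vertex generation, the shoelace sum and the border sum into one single loop over the moves with running accumulators, eliminating A's intermediate vertex list Ps and its separate zip/slice comprehension pass.
import Mathlib
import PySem

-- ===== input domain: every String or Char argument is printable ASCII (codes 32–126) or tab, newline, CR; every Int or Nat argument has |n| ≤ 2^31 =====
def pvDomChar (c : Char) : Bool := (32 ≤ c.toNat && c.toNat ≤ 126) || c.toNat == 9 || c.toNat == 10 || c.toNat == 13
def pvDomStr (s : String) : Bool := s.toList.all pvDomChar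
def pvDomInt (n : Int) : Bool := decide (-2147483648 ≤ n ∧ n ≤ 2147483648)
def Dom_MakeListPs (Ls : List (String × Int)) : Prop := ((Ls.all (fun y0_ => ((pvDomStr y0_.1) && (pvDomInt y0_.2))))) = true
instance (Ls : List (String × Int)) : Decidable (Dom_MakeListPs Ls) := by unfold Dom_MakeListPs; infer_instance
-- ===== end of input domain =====

-- B fuses A's three passes (vertex list, zip shoelace sum, border sum) into one loop
-- with running accumulators; objective: simpler (no intermediate vertex list).

-- ===== PORT A =====
-- A's loop body: the four independent ifs, then append (x, y) to Ps
def MakeListPsBody (st : Int × Int × List (Int × Int)) (l : String × Int) : Int × Int × List (Int × Int) :=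
  let x := st.1
  let y := st.2.1
  let Ps := st.2.2
  let move := l.1
  let delta := l.2
  let x := if move == "U" then x + delta else x
  let y := if move == "R" then y + delta else y
  let x := if move == "D" then x - delta else x
  let y := if move == "L" then y - delta else y
  (x, y, Ps ++ [(x, y)])

def MakeListPs (Ls : List (String × Int)) : Int :=
  let r := Ls.foldl MakeListPsBody (0, 0, [((0 : Int), (0 : Int))])
  let Ps := r.2.2
  let inside := (((PySem.List.slice Ps none (some (-1))).zip
      (PySem.List.slice Ps (some 1) none)).map
      (fun p => p.1.1 * p.2.2 - p.2.1 * p.1.2)).sum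
  let border := (Ls.map (fun l => l.2)).sum
  PySem.Int.floordiv (inside + border) 2 + 1

-- ===== PORT B =====
-- B's loop body: if/elif chain to the next point, then fused accumulator updates
def MakeListPsAltBody (st : Int × Int × Int × Int) (l : String × Int) : Int × Int × Int × Int :=
  let x := st.1
  let y := st.2.1
  let inside := st.2.2.1
  let border := st.2.2.2
  let move := l.1
  let delta := l.2
  let n := if move == "U" then (x + delta, y)
    else if move == "R" then (x, y + delta)
    else if move == "D" then (x - delta, y)
    else if move == "L" then (x, y - delta)
    else (x, y)
  (n.1, n.2, inside + x * n.2 - n.1 * y, border + delta)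

def MakeListPs_alt (Ls : List (String × Int)) : Int :=
  let r := Ls.foldl MakeListPsAltBody (0, 0, 0, 0)
  PySem.Int.floordiv (r.2.2.1 + r.2.2.2) 2 + 1

-- ===== PRECONDITION & SPEC =====
def Spec_MakeListPs (Ls : List (String × Int)) (out : Int) : Prop := out = MakeListPs_alt Ls
instance (Ls : List (String × Int)) (out : Int) : Decidable (Spec_MakeListPs Ls out) := by unfold Spec_MakeListPs; infer_instance

-- ===== CLAIM (what is proved, stated in full; the proofs are below) =====
def Claim_equal_MakeListPs : Prop := ∀ (Ls : List (String × Int)), Dom_MakeListPs Ls → Spec_MakeListPs Ls (MakeListPs Ls)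

-- ===== LEMMAS AND PROOFS =====

-- the next point after one move, as B computes it
def pvStep (x y : Int) (l : String × Int) : Int × Int :=
  if l.1 == "U" then (x + l.2, y)
  else if l.1 == "R" then (x, y + l.2)
  else if l.1 == "D" then (x - l.2, y)
  else if l.1 == "L" then (x, y - l.2)
  else (x, y)

-- the list of points visited after each move (A's Ps without its head)
def pvTraj (x y : Int) : List (String × Int) → List (Int × Int)
  | [] => []
  | l :: ls =>
      let n := pvStep x y l
      n :: pvTraj n.1 n.2 ls

-- the final point
def pvWalk (x y : Int) : List (String × Int) → Int × Int
  | [] => (x, y)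
  | l :: ls =>
      let n := pvStep x y l
      pvWalk n.1 n.2 ls

-- shoelace sum over consecutive pairs
def pvShoe : List (Int × Int) → Int
  | a :: b :: rest => (a.1 * b.2 - b.1 * a.2) + pvShoe (b :: rest)
  | _ => 0

-- A's sequential independent ifs compute the same next point as B's elif chain
theorem pvA_body (x y : Int) (Ps : List (Int × Int)) (l : String × Int) :
    MakeListPsBody (x, y, Ps) l = ((pvStep x y l).1, (pvStep x y l).2, Ps ++ [pvStep x y l]) := by
  unfold MakeListPsBody pvStep
  by_cases h1 : l.1 == "U" <;> by_cases h2 : l.1 == "R" <;>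
    by_cases h3 : l.1 == "D" <;> by_cases h4 : l.1 == "L" <;>
    simp_all

theorem pvB_body (x y i b : Int) (l : String × Int) :
    MakeListPsAltBody (x, y, i, b) l
      = ((pvStep x y l).1, (pvStep x y l).2,
         i + x * (pvStep x y l).2 - (pvStep x y l).1 * y, b + l.2) := rfl

theorem pvA_fold (Ls : List (String × Int)) : ∀ (x y : Int) (Ps : List (Int × Int)),
    Ls.foldl MakeListPsBody (x, y, Ps)
    = ((pvWalk x y Ls).1, (pvWalk x y Ls).2, Ps ++ pvTraj x y Ls) := by
  induction Ls with
  | nil => simp [pvWalk, pvTraj]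
  | cons l ls ih =>
    intro x y Ps
    rw [List.foldl_cons, pvA_body, ih]
    simp [pvWalk, pvTraj]

theorem pvB_fold (Ls : List (String × Int)) : ∀ (x y i b : Int),
    Ls.foldl MakeListPsAltBody (x, y, i, b)
    = ((pvWalk x y Ls).1, (pvWalk x y Ls).2,
       i + pvShoe ((x, y) :: pvTraj x y Ls), b + (Ls.map (fun l => l.2)).sum) := by
  induction Ls with
  | nil => simp [pvWalk, pvTraj, pvShoe]
  | cons l ls ih =>
    intro x y i b
    rw [List.foldl_cons, pvB_body, ih]
    simp only [pvTraj, pvWalk, pvShoe, List.map_cons, List.sum_cons, Prod.mk.injEq]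
    exact ⟨trivial, trivial, by ring, by ring⟩

-- the zip-of-slices shoelace comprehension equals pvShoe
theorem pvShoe_zip : ∀ (Ps : List (Int × Int)),
    ((Ps.dropLast.zip Ps.tail).map (fun p => p.1.1 * p.2.2 - p.2.1 * p.1.2)).sum = pvShoe Ps
  | [] => by simp [pvShoe]
  | [a] => by simp [pvShoe]
  | a :: b :: rest => by
    have ih := pvShoe_zip (b :: rest)
    simp only [List.dropLast_cons₂, List.tail_cons, List.zip_cons_cons,
      List.map_cons, List.sum_cons] at *
    rw [ih]
    rfl

-- ===== VERDICT (by name: the statement is the Claim_ definition above) =====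
theorem MakeListPs_spec : Claim_equal_MakeListPs := by
  intro Ls _
  unfold Spec_MakeListPs MakeListPs MakeListPs_alt
  rw [pvA_fold Ls 0 0, pvB_fold Ls 0 0 0 0]
  simp only [PySem.List.slice_to_neg_one, PySem.List.slice_from_one,
    List.singleton_append, pvShoe_zip, zero_add]
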